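-- pv_equiv track=rewrite | github.com/Aderfi/Pharmagen | farmagene_grapher.py | create_mask_from_coords
-- ===== SOURCE A (Python) =====
-- def create_mask_from_coords(total_length, exon_ranges):
--     """
--     total_length: int (largo de ref_seq)
--     exon_ranges: lista de tuplas [(start, end), (start, end)]
--     Retorna: lista de 0s y 1s
--     """
--     # Iniciamos todo como Intrón (0)
--     mask = [0] * total_length
--
--     for start, end in exon_ranges:
--         # Asegurar límites
--         s = max(0, start)
--         e = min(total_length, end)
--         for i in range(s, e):
--             mask[i] = 1 # Marcar zona de exón
--
--     return mask
-- ===== SOURCE B (Python) =====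
-- def create_mask_from_coords(total_length, exon_ranges):
--     """
--     total_length: int (largo de ref_seq)
--     exon_ranges: lista de tuplas [(start, end), (start, end)]
--     Retorna: lista de 0s y 1s
--     """
--     n = max(0, total_length)
--     delta = [0] * (n + 1)
--     for start, end in exon_ranges:
--         s = max(0, start)
--         e = min(n, end)
--         if e > s:
--             delta[s] += 1
--             delta[e] -= 1
--     mask = []
--     run = 0
--     for i in range(n):
--         run += delta[i]
--         mask.append(1 if run > 0 else 0)
--     return mask
-- ===== Notes on version B (the rewrite author's own statement) =====
-- stated objective: alternative
-- what changed: Replaces A's per-index writes over every exon range with endpoint stamping in a difference array plus one prefix-sum sweep, so work per range is O(1) instead of proportional to its length.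
import Mathlib
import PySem

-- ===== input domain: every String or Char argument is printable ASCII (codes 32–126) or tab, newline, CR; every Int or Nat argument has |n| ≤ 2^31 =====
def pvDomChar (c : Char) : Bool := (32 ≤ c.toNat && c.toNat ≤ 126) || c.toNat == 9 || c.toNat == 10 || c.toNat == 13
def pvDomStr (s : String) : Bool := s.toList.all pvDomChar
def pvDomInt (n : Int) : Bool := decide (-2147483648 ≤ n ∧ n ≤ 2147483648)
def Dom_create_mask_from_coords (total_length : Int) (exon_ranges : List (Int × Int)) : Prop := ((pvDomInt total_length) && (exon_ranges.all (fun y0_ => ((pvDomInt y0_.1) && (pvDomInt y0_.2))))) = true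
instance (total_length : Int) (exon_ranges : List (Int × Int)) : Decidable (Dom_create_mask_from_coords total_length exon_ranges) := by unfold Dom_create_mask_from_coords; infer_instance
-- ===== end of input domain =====

-- B replaces A's per-index writes over every exon range with endpoint stamping in a
-- difference array plus one prefix-sum sweep (objective: alternative algorithm).

-- ===== PORT A =====
-- mask[i] = 1 is exact as List.set i.toNat: every i in range(s, e) satisfies i ≥ s ≥ 0
-- and i < e ≤ total_length = len(mask), so no negative-index wraparound can occur.
def create_mask_from_coords (total_length : Int) (exon_ranges : List (Int × Int)) : List Int :=
  let mask := List.replicate total_length.toNat (0 : Int)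
  exon_ranges.foldl (fun mask se =>
    let s := max 0 se.1
    let e := min total_length se.2
    (PySem.List.pyRange s e 1).foldl (fun m i => m.set i.toNat 1) mask) mask

-- ===== PORT B =====
-- delta[s] += 1 / delta[e] -= 1 are exact as getD/set at s.toNat/e.toNat: the guard e > s
-- with s = max(0,start) ≥ 0 and e = min(n,end) ≤ n keeps both indices in 0..n < len(delta).
def create_mask_from_coords_alt (total_length : Int) (exon_ranges : List (Int × Int)) : List Int :=
  let n := max 0 total_length
  let delta := exon_ranges.foldl (fun d se =>
    let s := max 0 se.1
    let e := min n se.2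
    if e > s then
      let d1 := d.set s.toNat (d.getD s.toNat 0 + 1)
      d1.set e.toNat (d1.getD e.toNat 0 - 1)
    else d) (List.replicate (n.toNat + 1) (0 : Int))
  ((PySem.List.pyRange 0 n 1).foldl (fun (acc : List Int × Int) i =>
      let run := acc.2 + delta.getD i.toNat 0
      (acc.1 ++ [if run > 0 then (1 : Int) else 0], run)) ([], 0)).1

-- ===== PRECONDITION & SPEC =====
def Spec_create_mask_from_coords (total_length : Int) (exon_ranges : List (Int × Int)) (out : List Int) : Prop := out = create_mask_from_coords_alt total_length exon_ranges
instance (total_length : Int) (exon_ranges : List (Int × Int)) (out : List Int) : Decidable (Spec_create_mask_from_coords total_length exon_ranges out) := by unfold Spec_create_mask_from_coords; infer_instance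

-- ===== CLAIM (what is proved, stated in full; the proofs are below) =====
def Claim_equal_create_mask_from_coords : Prop := ∀ (total_length : Int) (exon_ranges : List (Int × Int)), Dom_create_mask_from_coords total_length exon_ranges → Spec_create_mask_from_coords total_length exon_ranges (create_mask_from_coords total_length exon_ranges)

-- ===== LEMMAS AND PROOFS =====

-- "index j is covered by range se (clamped to [0, tl))"
def pvCov (tl : Int) (j : Nat) (se : Int × Int) : Bool :=
  decide (max 0 se.1 ≤ (j : Int) ∧ (j : Int) < min tl se.2)

theorem pv_sum_take_succ (d : List Int) : ∀ (m : Nat),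
    (d.take (m + 1)).sum = (d.take m).sum + d.getD m 0 := by
  induction d with
  | nil => intro m; simp
  | cons a d ih =>
    intro m
    cases m with
    | zero => simp
    | succ m => simp [List.take_succ_cons, ih m]; ring

theorem pv_sum_take_set (d : List Int) : ∀ (k m : Nat) (c : Int), k < d.length →
    ((d.set k (d.getD k 0 + c)).take m).sum = (d.take m).sum + if k < m then c else 0 := by
  induction d with
  | nil => intro k m c h; simp at h
  | cons a d ih =>
    intro k m c h
    cases k with
    | zero =>
      cases m with
      | zero => simp
      | succ m => simp [List.take_succ_cons]; ring
    | succ k =>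
      cases m with
      | zero => simp
      | succ m =>
        simp only [List.set_cons_succ, List.getD_cons_succ, List.take_succ_cons, List.sum_cons,
          ih k m c (by simpa using h)]
        split_ifs <;> omega

theorem pv_scan_spec (d : List Int) : ∀ (m : Nat),
    (PySem.List.pyRange 0 (m : Int) 1).foldl (fun (acc : List Int × Int) (i : Int) =>
        let run := acc.2 + d.getD i.toNat 0
        (acc.1 ++ [if run > 0 then (1 : Int) else 0], run)) ([], 0)
      = ((List.range m).map (fun j => if (d.take (j + 1)).sum > 0 then (1 : Int) else 0),
         (d.take m).sum) := by
  intro m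
  induction m with
  | zero => simp
  | succ m ih =>
    have hsplit : PySem.List.pyRange 0 ((m + 1 : Nat) : Int) 1
        = PySem.List.pyRange 0 (m : Int) 1 ++ [(m : Int)] := by
      push_cast
      exact PySem.List.pyRange_one_succ_right (by positivity)
    rw [hsplit, List.foldl_append, ih]
    simp [List.range_succ, pv_sum_take_succ d m]

theorem pv_paint_aux (e : Int) : ∀ (n : Nat) (s : Int) (mask : List Int) (j : Nat), 0 ≤ s → n = (e - s).toNat →
    ((PySem.List.pyRange s e 1).foldl (fun (m : List Int) (i : Int) => m.set i.toNat 1) mask)[j]? =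
      if s ≤ (j : Int) ∧ (j : Int) < e ∧ j < mask.length then some 1 else mask[j]? := by
  intro n
  induction n with
  | zero =>
    intro s mask j hs hn
    rw [PySem.List.pyRange_one_eq_nil (by omega)]
    simp only [List.foldl_nil]
    rw [if_neg (by omega)]
  | succ n ih =>
    intro s mask j hs hn
    rw [PySem.List.pyRange_one_cons (by omega)]
    simp only [List.foldl_cons]
    rw [ih (s + 1) (mask.set s.toNat 1) j (by omega) (by omega)]
    rw [List.length_set, List.getElem?_set]
    have hj : ((j : Int)).toNat = j := by omega
    split_ifs <;> first | rfl | omega | (symm; exact List.getElem?_eq_none (by omega))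

theorem pv_paint_getElem? (s e : Int) (mask : List Int) (j : Nat) (hs : 0 ≤ s) :
    ((PySem.List.pyRange s e 1).foldl (fun (m : List Int) (i : Int) => m.set i.toNat 1) mask)[j]? =
      if s ≤ (j : Int) ∧ (j : Int) < e ∧ j < mask.length then some 1 else mask[j]? :=
  pv_paint_aux e (e - s).toNat s mask j hs rfl

theorem pv_paint_length (l : List Int) (mask : List Int) :
    (l.foldl (fun (m : List Int) (i : Int) => m.set i.toNat 1) mask).length = mask.length := by
  induction l generalizing mask with
  | nil => rfl
  | cons a l ih => simp [List.foldl, ih]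

theorem pv_A_getElem? (tl : Int) (rs : List (Int × Int)) : ∀ (mask : List Int) (j : Nat),
    (rs.foldl (fun mask se =>
      (PySem.List.pyRange (max 0 se.1) (min tl se.2) 1).foldl
        (fun (m : List Int) (i : Int) => m.set i.toNat 1) mask) mask)[j]? =
      if rs.any (pvCov tl j) ∧ j < mask.length then some 1 else mask[j]? := by
  induction rs with
  | nil => intro mask j; simp
  | cons r rs ih =>
    intro mask j
    simp only [List.foldl_cons, List.any_cons]
    rw [ih, pv_paint_length, pv_paint_getElem? _ _ mask j (le_max_left 0 r.1)]
    have hcov : pvCov tl j r = decide (max 0 r.1 ≤ (j : Int) ∧ (j : Int) < min tl r.2) := rfl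
    by_cases hc : max 0 r.1 ≤ (j : Int) ∧ (j : Int) < min tl r.2 <;>
      by_cases ha : rs.any (pvCov tl j) <;>
        by_cases hl : j < mask.length <;>
          simp [hcov, hc, ha, hl]

theorem pv_stamp_sum (tl : Int) (h0 : 0 ≤ tl) (j : Nat) (hj : j < tl.toNat)
    (d : List Int) (hd : d.length = tl.toNat + 1) (se : Int × Int) :
    ((if min tl se.2 > max 0 se.1 then
        ((d.set (max 0 se.1).toNat (d.getD (max 0 se.1).toNat 0 + 1)).set (min tl se.2).toNat
          ((d.set (max 0 se.1).toNat (d.getD (max 0 se.1).toNat 0 + 1)).getD (min tl se.2).toNat 0 - 1))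
      else d).take (j + 1)).sum
      = (d.take (j + 1)).sum + (if pvCov tl j se then (1 : Int) else 0) := by
  set s : Int := max 0 se.1 with hs
  set e : Int := min tl se.2 with he
  have hcv : pvCov tl j se = decide (s ≤ (j : Int) ∧ (j : Int) < e) := rfl
  have hs0 : 0 ≤ s := le_max_left 0 se.1
  have hetl : e ≤ tl := min_le_left tl se.2
  clear_value s e
  by_cases hgt : e > s
  · rw [if_pos hgt]
    have hsl : s.toNat < d.length := by omega
    have hel : e.toNat < (d.set s.toNat (d.getD s.toNat 0 + 1)).length := by
      rw [List.length_set]; omega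
    have h1 := pv_sum_take_set d s.toNat (j + 1) 1 hsl
    have h2 := pv_sum_take_set (d.set s.toNat (d.getD s.toNat 0 + 1)) e.toNat (j + 1) (-1) hel
    simp only [sub_eq_add_neg] at *
    rw [h2, h1, hcv]
    clear h1 h2 hsl hel hd hs he
    generalize (List.take (j + 1) d).sum = S
    by_cases hcond : s ≤ (j : Int) ∧ (j : Int) < e
    · obtain ⟨hc1, hc2⟩ := hcond
      rw [if_pos (by omega : s.toNat < j + 1), if_neg (by omega : ¬ e.toNat < j + 1)]
      simp [hc1, hc2]
    · have hdec : decide (s ≤ (j : Int) ∧ (j : Int) < e) = false := by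
        simpa using hcond
      rw [hdec]
      simp only [Bool.false_eq_true, if_false]
      split_ifs <;> omega
  · rw [if_neg hgt, hcv, if_neg (by simp; omega)]
    simp

theorem pv_stamp_len (tl : Int) (d : List Int) (se : Int × Int) :
    ((fun (d : List Int) (se : Int × Int) =>
        let s := max 0 se.1
        let e := min tl se.2
        if e > s then
          let d1 := d.set s.toNat (d.getD s.toNat 0 + 1)
          d1.set e.toNat (d1.getD e.toNat 0 - 1)
        else d) d se).length = d.length := by
  simp only []
  split_ifs <;> simp

theorem pv_delta_sum (tl : Int) (h0 : 0 ≤ tl) (j : Nat) (hj : j < tl.toNat)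
    (rs : List (Int × Int)) : ∀ (d : List Int), d.length = tl.toNat + 1 →
    ((rs.foldl (fun (d : List Int) (se : Int × Int) =>
        let s := max 0 se.1
        let e := min tl se.2
        if e > s then
          let d1 := d.set s.toNat (d.getD s.toNat 0 + 1)
          d1.set e.toNat (d1.getD e.toNat 0 - 1)
        else d) d).take (j + 1)).sum
      = (d.take (j + 1)).sum + (rs.countP (pvCov tl j) : Int) := by
  induction rs with
  | nil => intro d hd; simp
  | cons r rs ih =>
    intro d hd
    simp only [List.foldl_cons, List.countP_cons]
    rw [ih _ (by rw [pv_stamp_len]; exact hd)]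
    have hb : ((((fun (d : List Int) (se : Int × Int) =>
        let s := max 0 se.1
        let e := min tl se.2
        if e > s then
          let d1 := d.set s.toNat (d.getD s.toNat 0 + 1)
          d1.set e.toNat (d1.getD e.toNat 0 - 1)
        else d) d r).take (j + 1)).sum)
        = (d.take (j + 1)).sum + (if pvCov tl j r then (1 : Int) else 0) :=
      pv_stamp_sum tl h0 j hj d hd r
    rw [hb]
    by_cases hc : pvCov tl j r <;> simp [hc] <;> ring

theorem pv_A_length (tl : Int) (rs : List (Int × Int)) : ∀ (mask : List Int),
    (rs.foldl (fun mask se =>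
      (PySem.List.pyRange (max 0 se.1) (min tl se.2) 1).foldl
        (fun (m : List Int) (i : Int) => m.set i.toNat 1) mask) mask).length = mask.length := by
  induction rs with
  | nil => intro mask; rfl
  | cons r rs ih => intro mask; rw [List.foldl_cons, ih, pv_paint_length]

theorem pv_main (tl : Int) (rs : List (Int × Int)) :
    create_mask_from_coords tl rs = create_mask_from_coords_alt tl rs := by
  by_cases h0 : 0 ≤ tl
  · have hn : max 0 tl = tl := max_eq_right h0
    have hA : create_mask_from_coords tl rs
        = rs.foldl (fun mask se =>
            (PySem.List.pyRange (max 0 se.1) (min tl se.2) 1).foldl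
              (fun (m : List Int) (i : Int) => m.set i.toNat 1) mask)
          (List.replicate tl.toNat (0 : Int)) := rfl
    have hdelta_len : (List.replicate (tl.toNat + 1) (0 : Int)).length = tl.toNat + 1 := by simp
    have hB : create_mask_from_coords_alt tl rs
        = ((PySem.List.pyRange 0 tl 1).foldl (fun (acc : List Int × Int) i =>
            let run := acc.2 + (rs.foldl (fun (d : List Int) (se : Int × Int) =>
              let s := max 0 se.1
              let e := min tl se.2
              if e > s then
                let d1 := d.set s.toNat (d.getD s.toNat 0 + 1)
                d1.set e.toNat (d1.getD e.toNat 0 - 1)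
              else d) (List.replicate (tl.toNat + 1) (0 : Int))).getD i.toNat 0
            (acc.1 ++ [if run > 0 then (1 : Int) else 0], run)) ([], 0)).1 := by
      unfold create_mask_from_coords_alt
      rw [hn]
    set delta := rs.foldl (fun (d : List Int) (se : Int × Int) =>
        let s := max 0 se.1
        let e := min tl se.2
        if e > s then
          let d1 := d.set s.toNat (d.getD s.toNat 0 + 1)
          d1.set e.toNat (d1.getD e.toNat 0 - 1)
        else d) (List.replicate (tl.toNat + 1) (0 : Int)) with hdelta
    have htl : ((tl.toNat : Nat) : Int) = tl := Int.toNat_of_nonneg h0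
    have hB2 : create_mask_from_coords_alt tl rs
        = (List.range tl.toNat).map
            (fun j => if (delta.take (j + 1)).sum > 0 then (1 : Int) else 0) := by
      rw [hB, ← htl, pv_scan_spec delta tl.toNat]
      simp [max_eq_left h0]
    have hsum : ∀ j : Nat, j < tl.toNat →
        (delta.take (j + 1)).sum = (rs.countP (pvCov tl j) : Int) := by
      intro j hj
      rw [hdelta, pv_delta_sum tl h0 j hj rs _ (by simp)]
      simp [List.take_replicate]
    rw [hA, hB2]
    apply List.ext_getElem?
    intro j
    rw [pv_A_getElem?]
    by_cases hj : j < tl.toNat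
    · have hBj : ((List.range tl.toNat).map
          (fun j => if (delta.take (j + 1)).sum > 0 then (1 : Int) else 0))[j]?
          = some (if (delta.take (j + 1)).sum > 0 then (1 : Int) else 0) := by
        simp [List.getElem?_map, List.getElem?_range hj]
      rw [hBj, hsum j hj]
      by_cases hany : rs.any (pvCov tl j)
      · have hpos : 0 < rs.countP (pvCov tl j) := by
          rw [List.countP_pos_iff]
          simpa [List.any_eq_true] using hany
        simp [hany, hj, hpos]
      · have hzero : rs.countP (pvCov tl j) = 0 := by
          rw [List.countP_eq_zero]
          intro a ha
          rw [List.any_eq_true] at hany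
          intro hc
          exact hany ⟨a, ha, hc⟩
        simp [hany, hj, hzero]
    · rw [if_neg (by simp [hj])]
      rw [List.getElem?_eq_none (by simpa using hj),
        List.getElem?_eq_none (by simpa using hj)]
  · have htl0 : tl.toNat = 0 := by omega
    have hn : max 0 tl = 0 := max_eq_left (by omega)
    have hA : create_mask_from_coords tl rs
        = rs.foldl (fun mask se =>
            (PySem.List.pyRange (max 0 se.1) (min tl se.2) 1).foldl
              (fun (m : List Int) (i : Int) => m.set i.toNat 1) mask)
          (List.replicate tl.toNat (0 : Int)) := rfl
    have : create_mask_from_coords tl rs = [] := by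
      have := pv_A_length tl rs (List.replicate tl.toNat (0 : Int))
      rw [← hA] at this
      simp [htl0] at this
      exact this
    rw [this]
    unfold create_mask_from_coords_alt
    rw [hn]
    simp [PySem.List.pyRange]

-- ===== VERDICT (by name: the statement is the Claim_ definition above) =====
theorem create_mask_from_coords_spec : Claim_equal_create_mask_from_coords := by
  intro tl rs _
  exact pv_main tl rs
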